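-- pv_equiv track=rewrite | github.com/Rishabh5903/Competitive_Programming | Codeforces/Extra practice/1904d1.py | check_any_index
-- ===== SOURCE A (Python) =====
-- def check_backward(start, end, a, b):
--     temp = []
--     curr = 0
--     next_val = a[end - 1]
--     for i in range(start, end):
--         index = end - 1 - (i - start)
--         if len(temp) > curr:
--             next_val = temp[curr]
--         else:
--             next_val = a[index]
--         if a[index] == next_val and len(temp) > curr:
--             curr += 1
--         if len(temp) > curr:
--             next_val = temp[curr]
--         else:
--             next_val = a[index]
--         if next_val != b[index]:
--             temp.append(b[index])
--     return len(temp) == curr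
--
-- def check_forward(start, end, a, b):
--     temp = []
--     curr = 0
--     next_val = a[start]
--     for i in range(start, end):
--         if len(temp) > curr:
--             next_val = temp[curr]
--         else:
--             next_val = a[i]
--         if a[i] == next_val and len(temp) > curr:
--             curr += 1
--         if len(temp) > curr:
--             next_val = temp[curr]
--         else:
--             next_val = a[i]
--         if next_val != b[i]:
--             temp.append(b[i])
--     return len(temp) == curr
--
-- def check_any_index(a, b):
--     n = len(a)
--     if check_backward(0, n, a, b) or check_forward(0, n, a, b):
--         return True
--
--     for i in range(n + 1):
--         left_ok = i == n or check_backward(i, n, a, b)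
--         right_ok = i == 0 or check_forward(0, i, a, b)
--         if left_ok and right_ok:
--             return True
--
--     return False
-- ===== SOURCE B (Python) =====
-- def check_any_index(a, b):
--     # O(n): one left-to-right and one right-to-left pass of the same automaton,
--     # recording validity after each prefix/suffix, then combine.
--     n = len(a)
--
--     def step(temp, curr, x, y):
--         if len(temp) > curr and x == temp[curr]:
--             curr += 1
--         nxt = temp[curr] if len(temp) > curr else x
--         if nxt != y:
--             temp.append(y)
--         return temp, curr
--
--     fwd_ok = [True]          # fwd_ok[i] == check of the prefix of length i
--     temp, curr = [], 0
--     for i in range(n):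
--         temp, curr = step(temp, curr, a[i], b[i])
--         fwd_ok.append(len(temp) == curr)
--
--     back_ok = [True]         # after reverse: back_ok[i] == check of the suffix from i
--     temp, curr = [], 0
--     for i in range(n - 1, -1, -1):
--         temp, curr = step(temp, curr, a[i], b[i])
--         back_ok.append(len(temp) == curr)
--     back_ok.reverse()
--
--     return any(f and g for f, g in zip(fwd_ok, back_ok))
-- ===== Notes on version B (the rewrite author's own statement) =====
-- stated objective: faster
-- what changed: Instead of re-running the O(n) check for every split index (O(n^2)), B runs the same matching automaton once left-to-right and once right-to-left, recording prefix/suffix validity after each step, and combines the two arrays in one pass (O(n)).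
import Mathlib
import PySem

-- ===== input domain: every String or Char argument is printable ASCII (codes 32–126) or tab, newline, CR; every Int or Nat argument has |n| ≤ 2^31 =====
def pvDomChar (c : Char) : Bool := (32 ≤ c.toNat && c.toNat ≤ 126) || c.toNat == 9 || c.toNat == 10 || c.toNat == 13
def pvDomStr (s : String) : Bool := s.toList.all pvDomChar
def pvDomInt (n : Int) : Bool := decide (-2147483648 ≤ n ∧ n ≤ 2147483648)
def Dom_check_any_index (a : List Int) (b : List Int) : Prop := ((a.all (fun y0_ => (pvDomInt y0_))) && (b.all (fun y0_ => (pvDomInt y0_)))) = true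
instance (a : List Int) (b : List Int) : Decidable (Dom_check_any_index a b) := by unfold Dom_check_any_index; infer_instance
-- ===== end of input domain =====

-- B replaces A's per-split-index re-checks by two linear recording passes of the same automaton (objective: faster).

-- ===== PORT A =====
-- The body of the Python for-loop of check_backward/check_forward, verbatim (they share it up to
-- the choice of `index`).  List subscripts a[index], b[index], temp[curr] are ported with pyGetD
-- (default 0): exact under Pre_ (a nonempty, len a ≤ len b), where every subscript is in range.
def pvABody (a : List Int) (b : List Int) (index : Int) (s : List Int × Int × Int) :
    List Int × Int × Int :=
  let temp := s.1
  let curr := s.2.1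
  let next1 := if (temp.length : Int) > curr then PySem.List.pyGetD temp curr 0
               else PySem.List.pyGetD a index 0
  let curr1 := if PySem.List.pyGetD a index 0 == next1 && decide ((temp.length : Int) > curr)
               then curr + 1 else curr
  let next2 := if (temp.length : Int) > curr1 then PySem.List.pyGetD temp curr1 0
               else PySem.List.pyGetD a index 0
  let temp1 := if next2 != PySem.List.pyGetD b index 0
               then temp ++ [PySem.List.pyGetD b index 0] else temp
  (temp1, curr1, next2)

def check_backward (start : Int) (end_ : Int) (a : List Int) (b : List Int) : Bool :=
  let st := (PySem.List.pyRange start end_ 1).foldl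
    (fun s i => pvABody a b (end_ - 1 - (i - start)) s)
    ([], 0, PySem.List.pyGetD a (end_ - 1) 0)
  ((st.1.length : Int) == st.2.1)

def check_forward (start : Int) (end_ : Int) (a : List Int) (b : List Int) : Bool :=
  let st := (PySem.List.pyRange start end_ 1).foldl
    (fun s i => pvABody a b i s)
    ([], 0, PySem.List.pyGetD a start 0)
  ((st.1.length : Int) == st.2.1)

def check_any_index (a : List Int) (b : List Int) : Bool :=
  let n : Int := a.length
  if check_backward 0 n a b || check_forward 0 n a b then true
  else
    -- the for-loop with early `return True` = any over range(n+1)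
    (PySem.List.pyRange 0 (n + 1) 1).any (fun i =>
      (i == n || check_backward i n a b) && (i == 0 || check_forward 0 i a b))

-- ===== PORT B =====
-- port of Source B's helper `step`
def pvAltStep (st : List Int × Int) (x : Int) (y : Int) : List Int × Int :=
  let temp := st.1
  let curr := st.2
  let curr1 := if decide ((temp.length : Int) > curr) && x == PySem.List.pyGetD temp curr 0
               then curr + 1 else curr
  let nxt := if (temp.length : Int) > curr1 then PySem.List.pyGetD temp curr1 0 else x
  let temp1 := if nxt != y then temp ++ [y] else temp
  (temp1, curr1)

def check_any_index_alt (a : List Int) (b : List Int) : Bool :=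
  let n : Int := a.length
  let fwd := (PySem.List.pyRange 0 n 1).foldl
    (fun (s : (List Int × Int) × List Bool) (i : Int) =>
      let st := pvAltStep s.1 (PySem.List.pyGetD a i 0) (PySem.List.pyGetD b i 0)
      (st, s.2 ++ [((st.1.length : Int) == st.2)]))
    (([], 0), [true])
  let bwd := (PySem.List.pyRange (n - 1) (-1) (-1)).foldl
    (fun (s : (List Int × Int) × List Bool) (i : Int) =>
      let st := pvAltStep s.1 (PySem.List.pyGetD a i 0) (PySem.List.pyGetD b i 0)
      (st, s.2 ++ [((st.1.length : Int) == st.2)]))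
    (([], 0), [true])
  let back := bwd.2.reverse
  (fwd.2.zip back).any (fun p => p.1 && p.2)

-- ===== PRECONDITION & SPEC =====
-- Pre_ = exactly the inputs on which Python A returns: a = [] raises IndexError at a[end-1],
-- and len(b) < len(a) raises IndexError at b[index]; nothing else is excluded.
def Pre_check_any_index (a : List Int) (b : List Int) : Prop :=
  a ≠ [] ∧ a.length ≤ b.length
instance (a : List Int) (b : List Int) : Decidable (Pre_check_any_index a b) := by
  unfold Pre_check_any_index; infer_instance
def pvWitness_check_any_index : List Int × List Int := ([1], [1])

def Spec_check_any_index (a : List Int) (b : List Int) (out : Bool) : Prop := out = check_any_index_alt a b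
instance (a : List Int) (b : List Int) (out : Bool) : Decidable (Spec_check_any_index a b out) := by unfold Spec_check_any_index; infer_instance

-- ===== CLAIM (what is proved, stated in full; the proofs are below) =====
def Claim_equal_check_any_index : Prop := ∀ (a : List Int) (b : List Int), Dom_check_any_index a b → Pre_check_any_index a b → Spec_check_any_index a b (check_any_index a b)

-- ===== LEMMAS AND PROOFS =====

-- state of the automaton after consuming the positions listed in l (in order)
def pvChain (a b : List Int) (l : List Int) : List Int × Int :=
  l.foldl (fun s i => pvAltStep s (PySem.List.pyGetD a i 0) (PySem.List.pyGetD b i 0)) ([], 0)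

def pvOk (a b : List Int) (l : List Int) : Bool :=
  (((pvChain a b l).1.length : Int) == (pvChain a b l).2)

-- descending index list [e-1, e-2, …, e-m]
def pvDesc (e : Int) (m : Nat) : List Int := (List.range m).map (fun (k : Nat) => e - 1 - (k : Int))

theorem pvABody_proj (a b : List Int) (idx : Int) (s : List Int × Int × Int) :
    ((pvABody a b idx s).1, (pvABody a b idx s).2.1)
      = pvAltStep (s.1, s.2.1) (PySem.List.pyGetD a idx 0) (PySem.List.pyGetD b idx 0) := by
  unfold pvABody pvAltStep
  by_cases h : (s.1.length : Int) > s.2.1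
  · simp [h, Bool.and_comm]
  · simp [h]

theorem pvFold_proj (a b : List Int) (g : Int → Int) (l : List Int) (s : List Int × Int × Int) :
    (((l.foldl (fun s i => pvABody a b (g i) s) s).1,
      (l.foldl (fun s i => pvABody a b (g i) s) s).2.1))
      = l.foldl (fun t i => pvAltStep t (PySem.List.pyGetD a (g i) 0) (PySem.List.pyGetD b (g i) 0))
          (s.1, s.2.1) := by
  induction l generalizing s with
  | nil => rfl
  | cons x t ih =>
    simp only [List.foldl_cons]
    rw [ih, pvABody_proj]

theorem check_forward_eq (e : Int) (a b : List Int) :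
    check_forward 0 e a b = pvOk a b (PySem.List.pyRange 0 e 1) := by
  have := pvFold_proj a b (fun i => i) (PySem.List.pyRange 0 e 1)
    ([], 0, PySem.List.pyGetD a 0 0)
  rw [Prod.ext_iff] at this
  simp only at this
  simp only [check_forward, pvOk, pvChain]
  rw [this.1, this.2]

theorem pvMap_desc (s e : Int) :
    (PySem.List.pyRange s e 1).map (fun i => e - 1 - (i - s)) = pvDesc e (e - s).toNat := by
  apply List.ext_getElem
  · simp [PySem.List.length_pyRange_one, pvDesc]
  · intro k h1 h2
    simp only [pvDesc, List.getElem_map, List.getElem_range,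
      PySem.List.getElem_pyRange_one]
    omega

theorem check_backward_eq (s e : Int) (a b : List Int) :
    check_backward s e a b = pvOk a b (pvDesc e (e - s).toNat) := by
  have := pvFold_proj a b (fun i => e - 1 - (i - s)) (PySem.List.pyRange s e 1)
    ([], 0, PySem.List.pyGetD a (e - 1) 0)
  rw [Prod.ext_iff] at this
  simp only at this
  simp only [check_backward, pvOk, pvChain]
  rw [this.1, this.2, ← pvMap_desc s e, List.foldl_map]

theorem pvRec_snd (a b : List Int) (l : List Int) (s0 : List Int × Int) (acc : List Bool) :
    (l.foldl (fun (s : (List Int × Int) × List Bool) (i : Int) =>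
        let st := pvAltStep s.1 (PySem.List.pyGetD a i 0) (PySem.List.pyGetD b i 0)
        (st, s.2 ++ [((st.1.length : Int) == st.2)])) (s0, acc)).2
      = acc ++ (List.range l.length).map (fun k =>
          let st := (l.take (k + 1)).foldl
            (fun t i => pvAltStep t (PySem.List.pyGetD a i 0) (PySem.List.pyGetD b i 0)) s0
          (((st.1.length : Int) == st.2))) := by
  induction l generalizing s0 acc with
  | nil => simp
  | cons x t ih =>
    simp only [List.foldl_cons]
    rw [ih]
    simp [List.range_succ_eq_map, List.map_map, Function.comp_def, List.take_succ_cons]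

def pvF (a b : List Int) (m : Nat) : Bool := pvOk a b (PySem.List.pyRange 0 (m : Int) 1)
def pvB (a b : List Int) (m : Nat) : Bool := pvOk a b (pvDesc (a.length : Int) m)

theorem pvF_zero (a b : List Int) : pvF a b 0 = true := by
  simp [pvF, PySem.List.pyRange_one_eq_nil, pvOk, pvChain]
theorem pvB_zero (a b : List Int) : pvB a b 0 = true := by
  simp [pvB, pvDesc, pvOk, pvChain]

theorem pvTake_pyRange (n m : Nat) (h : m ≤ n) :
    (PySem.List.pyRange 0 (n : Int) 1).take m = PySem.List.pyRange 0 (m : Int) 1 := by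
  apply List.ext_getElem
  · simp [PySem.List.length_pyRange_one]; omega
  · intro k h1 h2
    simp only [List.getElem_take, PySem.List.getElem_pyRange_one]

theorem pvTake_desc (e : Int) (n m : Nat) (h : m ≤ n) :
    (pvDesc e n).take m = pvDesc e m := by
  apply List.ext_getElem
  · simp [pvDesc]; omega
  · intro k h1 h2
    simp [pvDesc, List.getElem_take]

theorem pvBwd_list (a : List Int) :
    PySem.List.pyRange ((a.length : Int) - 1) (-1) (-1) = pvDesc (a.length : Int) a.length := by
  rw [PySem.List.pyRange_neg_one]
  unfold pvDesc
  have : ((a.length : Int) - 1 - (-1)).toNat = a.length := by omega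
  rw [this]

theorem pvDesc_length (e : Int) (m : Nat) : (pvDesc e m).length = m := by
  simp [pvDesc]

theorem pvAlt_eq (a b : List Int) :
    check_any_index_alt a b
      = ((true :: (List.range a.length).map (fun k => pvF a b (k + 1))).zip
          ((true :: (List.range a.length).map (fun k => pvB a b (k + 1))).reverse)).any
          (fun p => p.1 && p.2) := by
  simp only [check_any_index_alt]
  rw [pvRec_snd, pvRec_snd, pvBwd_list]
  simp only [List.singleton_append, PySem.List.length_pyRange_one, sub_zero,
    Int.toNat_natCast, pvDesc_length]
  have hf : ∀ k ∈ List.range a.length,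
      (((((PySem.List.pyRange 0 (a.length : Int) 1).take (k + 1)).foldl
        (fun t i => pvAltStep t (PySem.List.pyGetD a i 0) (PySem.List.pyGetD b i 0))
        ([], 0)).1.length : Int)
        == (((PySem.List.pyRange 0 (a.length : Int) 1).take (k + 1)).foldl
        (fun t i => pvAltStep t (PySem.List.pyGetD a i 0) (PySem.List.pyGetD b i 0))
        ([], 0)).2) = pvF a b (k + 1) := by
    intro k hk
    rw [List.mem_range] at hk
    rw [pvTake_pyRange a.length (k + 1) (by omega)]
    rfl
  have hb : ∀ k ∈ List.range a.length,
      ((((((pvDesc (a.length : Int) a.length).take (k + 1)).foldl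
        (fun t i => pvAltStep t (PySem.List.pyGetD a i 0) (PySem.List.pyGetD b i 0))
        ([], 0)).1.length : Int)
        == ((((pvDesc (a.length : Int) a.length).take (k + 1))).foldl
        (fun t i => pvAltStep t (PySem.List.pyGetD a i 0) (PySem.List.pyGetD b i 0))
        ([], 0)).2)) = pvB a b (k + 1) := by
    intro k hk
    rw [List.mem_range] at hk
    rw [pvTake_desc _ _ _ (by omega : k + 1 ≤ a.length)]
    rfl
  rw [List.map_congr_left hf, List.map_congr_left hb]

theorem pvRevMapRange (n : Nat) (g : Nat → Bool) :
    ((List.range n).map g).reverse = (List.range n).map (fun k => g (n - 1 - k)) := by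
  induction n generalizing g with
  | zero => simp
  | succ m ih =>
    conv_lhs => rw [List.range_succ]
    rw [List.map_append, List.reverse_append, ih g]
    conv_rhs => rw [List.range_succ_eq_map]
    simp only [List.map_cons, List.map_nil, List.reverse_cons, List.reverse_nil,
      List.nil_append, List.singleton_append, List.map_map, Function.comp_def]
    congr 1
    apply List.map_congr_left
    intro k _
    congr 1
    omega

theorem pvZip_any (n : Nat) (F B : Nat → Bool) (hF : F 0 = true) (hB : B 0 = true) :
    ((true :: (List.range n).map (fun k => F (k + 1))).zip
      ((true :: (List.range n).map (fun k => B (k + 1))).reverse)).any (fun p => p.1 && p.2)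
    = (List.range (n + 1)).any (fun k => F k && B (n - k)) := by
  have hFl : (true :: (List.range n).map (fun k => F (k + 1)))
      = (List.range (n + 1)).map F := by
    rw [List.range_succ_eq_map]
    simp [List.map_map, Function.comp_def, hF]
  have hBl : ((true :: (List.range n).map (fun k => B (k + 1))).reverse)
      = (List.range (n + 1)).map (fun k => B (n - k)) := by
    rw [List.reverse_cons, pvRevMapRange]
    conv_rhs => rw [List.range_succ]
    rw [List.map_append]
    simp only [List.map_cons, List.map_nil, Nat.sub_self, hB]
    congr 1
    apply List.map_congr_left
    intro k hk
    rw [List.mem_range] at hk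
    congr 1
    omega
  rw [hFl, hBl, List.zip_map', List.any_map]
  rfl

theorem pvA_eq (a b : List Int) :
    check_any_index a b
      = (List.range (a.length + 1)).any (fun k => pvF a b k && pvB a b (a.length - k)) := by
  have hcb : ∀ k : Nat, k ≤ a.length →
      check_backward (k : Int) (a.length : Int) a b = pvB a b (a.length - k) := by
    intro k hk
    rw [check_backward_eq]
    have : ((a.length : Int) - (k : Int)).toNat = a.length - k := by omega
    rw [this]
    rfl
  have e1 : ∀ k : Nat, ((k : Int) == 0 || check_forward 0 (k : Int) a b) = pvF a b k := by
    intro k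
    by_cases h : k = 0
    · subst h
      simp [pvF_zero, check_forward_eq]
    · have hne : ((k : Int) == 0) = false := by simp; omega
      rw [hne, Bool.false_or, check_forward_eq]
      rfl
  have e2 : ∀ k : Nat, k ≤ a.length →
      ((k : Int) == (a.length : Int) || check_backward (k : Int) (a.length : Int) a b)
        = pvB a b (a.length - k) := by
    intro k hk
    by_cases h : k = a.length
    · subst h
      simp [pvB_zero]
    · have hne : ((k : Int) == (a.length : Int)) = false := by simp; omega
      rw [hne, Bool.false_or, hcb k hk]
  simp only [check_any_index]
  have hrange : PySem.List.pyRange 0 ((a.length : Int) + 1) 1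
      = (List.range (a.length + 1)).map (fun (k : Nat) => (k : Int)) := by
    rw [← Nat.cast_add_one, PySem.List.pyRange_zero_natCast]
  by_cases h : (check_backward 0 (a.length : Int) a b
      || check_forward 0 (a.length : Int) a b) = true
  · rw [if_pos h]
    rw [Bool.or_eq_true] at h
    rcases h with hc | hc
    · symm
      rw [List.any_eq_true]
      refine ⟨0, by simp, ?_⟩
      have h0 := hcb 0 (Nat.zero_le _)
      simp only [Nat.cast_zero] at h0
      have hb0 : pvB a b (a.length - 0) = true := by rw [← h0]; exact hc
      simp only [pvF_zero, Bool.true_and]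
      simpa using hb0
    · symm
      rw [List.any_eq_true]
      refine ⟨a.length, by simp, ?_⟩
      rw [check_forward_eq] at hc
      have hf : pvF a b a.length = true := hc
      simp [hf, pvB_zero]
  · rw [if_neg h]
    rw [hrange, List.any_map]
    have hterm : ∀ k : Nat, k ≤ a.length →
        ((((k : Int) == (a.length : Int)) || check_backward (k : Int) (a.length : Int) a b)
          && (((k : Int) == 0) || check_forward 0 (k : Int) a b))
        = (pvF a b k && pvB a b (a.length - k)) := by
      intro k hk
      rw [e1 k, e2 k hk, Bool.and_comm]
    refine Bool.eq_iff_iff.mpr ?_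
    rw [List.any_eq_true, List.any_eq_true]
    constructor
    · rintro ⟨k, hk, hp⟩
      have hk' := List.mem_range.mp hk
      refine ⟨k, hk, ?_⟩
      simp only [Function.comp_apply] at hp
      rw [← hterm k (by omega)]
      exact hp
    · rintro ⟨k, hk, hp⟩
      have hk' := List.mem_range.mp hk
      refine ⟨k, hk, ?_⟩
      simp only [Function.comp_apply]
      rw [hterm k (by omega)]
      exact hp

-- ===== VERDICT (by name: the statement is the Claim_ definition above) =====
theorem check_any_index_spec : Claim_equal_check_any_index := by
  intro a b _ _
  unfold Spec_check_any_index
  rw [pvA_eq, pvAlt_eq, pvZip_any a.length (pvF a b) (pvB a b) (pvF_zero a b) (pvB_zero a b)]
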